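-- pv_equiv track=rewrite | github.com/bkerdzaia/nand2tetris | projects/assembler/Code.py | dest
-- ===== SOURCE A (Python) =====
-- def dest(mnemonic):
--     """ Returns the binary code of the dest mnemonic. """
--     translated = ['0', '0', '0']
--     if mnemonic is None:
--         return "".join(translated)
--     for i in range(0, len(mnemonic)):
--         if mnemonic[i] == 'M':
--             translated[2] = '1'
--         elif mnemonic[i] == 'A':
--             translated[0] = '1'
--         elif mnemonic[i] == 'D':
--             translated[1] = '1'
--         else:
--             return None
--     return "".join(translated)
-- ===== SOURCE B (Python) =====
-- def dest(mnemonic):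
--     """ Returns the binary code of the dest mnemonic. """
--     if mnemonic is None:
--         return "000"
--     if set(mnemonic) - {'A', 'D', 'M'}:
--         return None
--     return ''.join('1' if c in mnemonic else '0' for c in 'ADM')
-- ===== Notes on version B (the rewrite author's own statement) =====
-- stated objective: idiomatic
-- what changed: Output-driven rewrite: instead of scanning input characters and mutating a 3-slot buffer with per-character branching, B validates once with a set difference and then builds the result by iterating the three output positions (A, D, M bits) and testing membership in the mnemonic.
import Mathlib
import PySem

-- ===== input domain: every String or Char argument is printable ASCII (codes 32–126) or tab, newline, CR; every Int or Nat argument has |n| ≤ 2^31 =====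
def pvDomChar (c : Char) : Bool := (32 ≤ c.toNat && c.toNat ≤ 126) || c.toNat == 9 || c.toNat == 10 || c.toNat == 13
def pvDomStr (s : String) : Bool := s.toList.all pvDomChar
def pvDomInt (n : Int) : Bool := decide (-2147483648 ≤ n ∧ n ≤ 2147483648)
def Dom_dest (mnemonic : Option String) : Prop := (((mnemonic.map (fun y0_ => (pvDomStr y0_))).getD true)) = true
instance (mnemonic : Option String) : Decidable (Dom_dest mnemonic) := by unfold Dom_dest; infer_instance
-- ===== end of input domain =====

-- B is an idiomatic output-driven rewrite: validate once, then build the three bits by membership in the mnemonic; same values everywhere.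

-- ===== PORT A =====
-- the for-loop over the characters, mutating the 3-slot buffer `t`; `none` = the early `return None`
def destLoop (cs : List Char) (t : List Char) : Option (List Char) :=
  match cs with
  | [] => some t
  | c :: rest =>
    if c = 'M' then destLoop rest (t.set 2 '1')
    else if c = 'A' then destLoop rest (t.set 0 '1')
    else if c = 'D' then destLoop rest (t.set 1 '1')
    else none

def dest (mnemonic : Option String) : Option String :=
  match mnemonic with
  | none => some "000"
  | some s => (destLoop s.toList ['0', '0', '0']).map (fun t => String.mk t)

-- ===== PORT B =====
def dest_alt (mnemonic : Option String) : Option String :=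
  match mnemonic with
  | none => some "000"
  | some s =>
    if s.toList.any (fun c => ¬(c = 'A' ∨ c = 'D' ∨ c = 'M')) then none
    else some (String.mk (['A', 'D', 'M'].map (fun c => if s.toList.contains c then '1' else '0')))

-- ===== PRECONDITION & SPEC =====
def Spec_dest (mnemonic : Option String) (out : Option String) : Prop := out = dest_alt mnemonic
instance (mnemonic : Option String) (out : Option String) : Decidable (Spec_dest mnemonic out) := by unfold Spec_dest; infer_instance

-- ===== CLAIM (what is proved, stated in full; the proofs are below) =====
def Claim_equal_dest : Prop := ∀ (mnemonic : Option String), Dom_dest mnemonic → Spec_dest mnemonic (dest mnemonic)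

-- ===== LEMMAS AND PROOFS =====
def pvBit (b : Bool) : Char := if b then '1' else '0'

theorem destLoop_char (cs : List Char) (a d m : Bool) :
    destLoop cs [pvBit a, pvBit d, pvBit m] =
      if cs.any (fun c => ¬(c = 'A' ∨ c = 'D' ∨ c = 'M')) then none
      else some [pvBit (a || cs.contains 'A'), pvBit (d || cs.contains 'D'),
                 pvBit (m || cs.contains 'M')] := by
  induction cs generalizing a d m with
  | nil => simp [destLoop]
  | cons c rest ih =>
    have hsM : ([pvBit a, pvBit d, pvBit m].set 2 '1') = [pvBit a, pvBit d, pvBit true] := by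
      simp [pvBit]
    have hsA : ([pvBit a, pvBit d, pvBit m].set 0 '1') = [pvBit true, pvBit d, pvBit m] := by
      simp [pvBit]
    have hsD : ([pvBit a, pvBit d, pvBit m].set 1 '1') = [pvBit a, pvBit true, pvBit m] := by
      simp [pvBit]
    by_cases hM : c = 'M'
    · subst hM
      simp [destLoop, hsM, ih, List.contains_cons]
    · by_cases hA : c = 'A'
      · subst hA
        simp [destLoop, hsA, ih, List.contains_cons]
      · by_cases hD : c = 'D'
        · subst hD
          simp [destLoop, hsD, ih, List.contains_cons]
        · simp [destLoop, hM, hA, hD, List.any_cons]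

-- ===== VERDICT (by name: the statement is the Claim_ definition above) =====
theorem dest_spec : Claim_equal_dest := by
  intro mnemonic _
  unfold Spec_dest dest dest_alt
  cases mnemonic with
  | none => rfl
  | some s =>
    have h := destLoop_char s.toList false false false
    dsimp only
    have h0 : (['0', '0', '0'] : List Char) = [pvBit false, pvBit false, pvBit false] := by decide
    rw [h0, h]
    simp only [pvBit, Bool.false_or, List.contains_eq_mem, List.any_eq_true, decide_not,
      Bool.not_eq_eq_eq_not, Bool.not_true, decide_eq_false_iff_not, not_or]
    split_ifs with hb <;> simp_all
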